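-- pv_equiv track=rewrite | github.com/nishu2498/DsaPractise | python/base9no.py | calculate
-- ===== SOURCE A (Python) =====
-- def calculate(number):
--     result = 0
--     multiplier = 1
--
--     while number > 0:
--
--         result = result + multiplier *(number%9)
--         number = number // 9
--         multiplier = multiplier * 10
--
--     return result
-- ===== SOURCE B (Python) =====
-- def calculate(number):
--     if number <= 0:
--         return 0
--     return number % 9 + 10 * calculate(number // 9)
-- ===== Notes on version B (the rewrite author's own statement) =====
-- stated objective: simpler
-- what changed: Replaces the iterative loop that threads a result/multiplier accumulator pair with a direct recursion (digit + 10 * recurse on quotient), eliminating both accumulator variables.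
import Mathlib
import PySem

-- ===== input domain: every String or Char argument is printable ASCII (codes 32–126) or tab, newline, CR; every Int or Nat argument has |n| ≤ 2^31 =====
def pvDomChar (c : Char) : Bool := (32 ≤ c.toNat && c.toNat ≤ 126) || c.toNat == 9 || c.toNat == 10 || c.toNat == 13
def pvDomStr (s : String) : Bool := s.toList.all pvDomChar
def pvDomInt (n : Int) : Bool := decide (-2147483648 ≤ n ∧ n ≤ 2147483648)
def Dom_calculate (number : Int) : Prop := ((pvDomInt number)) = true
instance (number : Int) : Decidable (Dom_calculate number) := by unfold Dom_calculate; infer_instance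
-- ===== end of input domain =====

-- B replaces A's accumulator loop with a direct recursion (simpler decomposition, same cost).

-- ===== PORT A =====
-- while-loop of A: state (number, result, multiplier)
def calculateLoop (number result multiplier : Int) : Int :=
  if number > 0 then
    calculateLoop (PySem.Int.floordiv number 9)
      (result + multiplier * PySem.Int.mod number 9) (multiplier * 10)
  else result
termination_by number.toNat
decreasing_by
  have h9 : PySem.Int.floordiv number 9 = number / 9 :=
    PySem.Int.floordiv_eq_ediv_of_pos (by omega)
  rw [h9]; omega

def calculate (number : Int) : Int := calculateLoop number 0 1

-- ===== PORT B =====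
def calculate_alt (number : Int) : Int :=
  if number ≤ 0 then 0
  else PySem.Int.mod number 9 + 10 * calculate_alt (PySem.Int.floordiv number 9)
termination_by number.toNat
decreasing_by
  have h9 : PySem.Int.floordiv number 9 = number / 9 :=
    PySem.Int.floordiv_eq_ediv_of_pos (by omega)
  rw [h9]; omega

-- ===== PRECONDITION & SPEC =====
def Spec_calculate (number : Int) (out : Int) : Prop := out = calculate_alt number
instance (number : Int) (out : Int) : Decidable (Spec_calculate number out) := by unfold Spec_calculate; infer_instance

-- ===== CLAIM (what is proved, stated in full; the proofs are below) =====
def Claim_equal_calculate : Prop := ∀ (number : Int), Dom_calculate number → Spec_calculate number (calculate number)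

-- ===== LEMMAS AND PROOFS =====
theorem calculateLoop_eq (k : Nat) :
    ∀ (n r m : Int), n.toNat ≤ k → calculateLoop n r m = r + m * calculate_alt n := by
  induction k with
  | zero =>
    intro n r m hn
    have hle : n ≤ 0 := by omega
    rw [calculateLoop, calculate_alt]
    simp [hle, not_lt.mpr hle]
  | succ k ih =>
    intro n r m hn
    by_cases h : n > 0
    · have h9 : PySem.Int.floordiv n 9 = n / 9 :=
        PySem.Int.floordiv_eq_ediv_of_pos (by omega)
      rw [calculateLoop, if_pos h,
        ih (PySem.Int.floordiv n 9) _ _ (by rw [h9]; omega)]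
      conv_rhs => rw [calculate_alt, if_neg (by omega : ¬ n ≤ 0)]
      ring
    · rw [calculateLoop, if_neg h, calculate_alt, if_pos (by omega)]
      ring

-- ===== VERDICT (by name: the statement is the Claim_ definition above) =====
theorem calculate_spec : Claim_equal_calculate := by
  intro n _
  unfold Spec_calculate calculate
  rw [calculateLoop_eq n.toNat n 0 1 le_rfl]
  ring
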